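-- pv_equiv track=rewrite | github.com/satya-sovan/split-pro | backend/app/utils/numbers.py | calculate_equal_split
-- ===== SOURCE A (Python) =====
-- def calculate_equal_split(total: int, num_participants: int) -> list[int]:
--     """
--     Split amount equally among participants
--
--     Args:
--         total: Total amount in cents
--         num_participants: Number of people to split among
--
--     Returns:
--         List of amounts for each participant
--
--     Example:
--         calculate_equal_split(1000, 3) -> [334, 333, 333]
--     """
--     if num_participants == 0:
--         return []
--
--     base_share = total // num_participants
--     remainder = total % num_participants
--
--     shares = [base_share] * num_participants
--
--     # Distribute remainder to first N participants
--     for i in range(remainder):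
--         shares[i] += 1
--
--     return shares
-- ===== SOURCE B (Python) =====
-- def calculate_equal_split(total: int, num_participants: int) -> list[int]:
--     # Closed form: participant i gets ceil-adjusted floor share directly.
--     return [(total + num_participants - 1 - i) // num_participants
--             for i in range(num_participants)]
-- ===== Notes on version B (the rewrite author's own statement) =====
-- stated objective: simpler
-- what changed: Replaces the base-share list plus remainder-distribution mutation loop with a single closed-form comprehension computing each share directly by one floor division.
import Mathlib
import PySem

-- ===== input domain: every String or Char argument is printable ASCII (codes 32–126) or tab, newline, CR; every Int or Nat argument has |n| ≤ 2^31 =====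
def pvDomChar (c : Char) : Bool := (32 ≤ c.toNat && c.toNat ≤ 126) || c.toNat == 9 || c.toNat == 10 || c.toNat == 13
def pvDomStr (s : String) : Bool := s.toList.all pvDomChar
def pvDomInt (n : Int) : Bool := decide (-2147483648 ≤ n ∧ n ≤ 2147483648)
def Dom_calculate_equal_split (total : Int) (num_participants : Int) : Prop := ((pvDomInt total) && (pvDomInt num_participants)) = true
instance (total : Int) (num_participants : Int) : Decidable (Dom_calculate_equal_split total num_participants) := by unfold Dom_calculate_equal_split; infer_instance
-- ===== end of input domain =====

-- B replaces A's base-share list + remainder-distribution loop by one closed-form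
-- comprehension (simpler); return values are proved identical on all inputs.

-- ===== PORT A =====
def calculate_equal_split (total : Int) (num_participants : Int) : List Int :=
  if num_participants == 0 then []
  else
    let base_share := PySem.Int.floordiv total num_participants
    let remainder := PySem.Int.mod total num_participants
    let shares := List.replicate num_participants.toNat base_share
    -- for i in range(remainder): shares[i] += 1
    -- (exact: whenever the loop body runs, 0 ≤ i < remainder ≤ len(shares))
    (PySem.List.pyRange 0 remainder 1).foldl
      (fun sh i => sh.set i.toNat (sh.getD i.toNat 0 + 1)) shares

-- ===== PORT B =====
def calculate_equal_split_alt (total : Int) (num_participants : Int) : List Int :=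
  (PySem.List.pyRange 0 num_participants 1).map
    (fun i => PySem.Int.floordiv (total + num_participants - 1 - i) num_participants)

-- ===== PRECONDITION & SPEC =====
def Spec_calculate_equal_split (total : Int) (num_participants : Int) (out : List Int) : Prop := out = calculate_equal_split_alt total num_participants
instance (total : Int) (num_participants : Int) (out : List Int) : Decidable (Spec_calculate_equal_split total num_participants out) := by unfold Spec_calculate_equal_split; infer_instance

-- ===== CLAIM (what is proved, stated in full; the proofs are below) =====
def Claim_equal_calculate_equal_split : Prop := ∀ (total : Int) (num_participants : Int), Dom_calculate_equal_split total num_participants → Spec_calculate_equal_split total num_participants (calculate_equal_split total num_participants)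

-- ===== LEMMAS AND PROOFS =====

-- A's remainder loop over range(r) turns element j into l[j]+1 for j < r, leaving the rest.
theorem pv_fold_inc (l : List Int) (r : Nat) (hr : r ≤ l.length) :
    (PySem.List.pyRange 0 (r : Int) 1).foldl
        (fun sh i => sh.set i.toNat (sh.getD i.toNat 0 + 1)) l
      = l.mapIdx (fun j x => if j < r then x + 1 else x) := by
  induction r with
  | zero =>
      simp [PySem.List.pyRange_one_eq_nil (by omega : (0:Int) ≤ 0)]
      apply List.ext_getElem <;> simp
  | succ r ih =>
      have hcast : ((r : Int) + 1) = ((r + 1 : Nat) : Int) := by push_cast; ring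
      rw [← hcast, PySem.List.pyRange_one_succ_right (by positivity), List.foldl_append,
        ih (by omega)]
      simp only [List.foldl_cons, List.foldl_nil]
      have hgd : (l.mapIdx (fun j x => if j < r then x + 1 else x)).getD ((r:Int).toNat) 0
          = l[r] := by
        rw [List.getD_eq_getElem _ _ (by simpa using hr)]
        simp only [List.getElem_mapIdx, Int.toNat_natCast]
        rw [if_neg (lt_irrefl r)]
        rfl
      rw [hgd]
      apply List.ext_getElem
      · simp
      · intro j h1 h2
        rw [List.getElem_set]
        simp only [List.getElem_mapIdx, Int.toNat_natCast]
        rcases eq_or_ne r j with h | h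
        · simp [h]
        · have hiff : (j < r) ↔ (j < r + 1) := by omega
          simp [h, hiff]

-- B's element k is exactly base_share plus 1 iff k < remainder (n > 0).
theorem pv_closed_form (total n : Int) (hn : 0 < n) (k : Nat) (hk : (k : Int) < n) :
    PySem.Int.floordiv (total + n - 1 - k) n
      = PySem.Int.floordiv total n + (if (k : Int) < PySem.Int.mod total n then 1 else 0) := by
  have hsum := PySem.Int.floordiv_mul_add_mod total n
  have hmn := PySem.Int.mod_nonneg total hn
  have hml := PySem.Int.mod_lt total hn
  rcases lt_or_ge (k : Int) (PySem.Int.mod total n) with h | h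
  · rw [if_pos h, (PySem.Int.floordiv_eq_iff_of_pos hn)]
    constructor <;> nlinarith
  · rw [if_neg (by omega), (PySem.Int.floordiv_eq_iff_of_pos hn)]
    constructor <;> nlinarith

-- ===== VERDICT (by name: the statement is the Claim_ definition above) =====
theorem calculate_equal_split_spec : Claim_equal_calculate_equal_split := by
  intro total n _
  show calculate_equal_split total n = calculate_equal_split_alt total n
  unfold calculate_equal_split calculate_equal_split_alt
  rcases lt_trichotomy n 0 with hn | hn | hn
  · -- n < 0: both sides are []
    have h1 : PySem.List.pyRange 0 n 1 = [] := PySem.List.pyRange_one_eq_nil (by omega)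
    have hm := (PySem.Int.mod_neg_bounds total hn).2
    have h2 : PySem.List.pyRange 0 (PySem.Int.mod total n) 1 = [] :=
      PySem.List.pyRange_one_eq_nil (by omega)
    have h3 : n.toNat = 0 := by omega
    simp [h1, h2, h3, hn.ne]
  · simp [hn]
  · -- n > 0
    rw [if_neg (by simpa using hn.ne')]
    have hmn := PySem.Int.mod_nonneg total hn
    have hml := PySem.Int.mod_lt total hn
    have hcast : PySem.Int.mod total n = ((PySem.Int.mod total n).toNat : Int) := by omega
    rw [hcast, pv_fold_inc _ _ (by simp; omega)]
    apply List.ext_getElem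
    · simp [PySem.List.length_pyRange_one]
    · intro k h1 h2
      have hk : (k : Int) < n := by
        have := h2; rw [List.length_map, PySem.List.length_pyRange_one] at this; omega
      have hkn : k < n.toNat := by omega
      simp only [List.getElem_mapIdx, List.getElem_replicate, List.getElem_map,
        PySem.List.getElem_pyRange_one, zero_add]
      rw [pv_closed_form total n hn k hk]
      split_ifs <;> omega
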